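-- pv_equiv track=rewrite | github.com/zhrmrz/max_dist | max_dist.py | max_dist
-- ===== SOURCE A (Python) =====
-- def max_dist(seats):
--     l = [i for i, x in enumerate(seats) if x == 1]
--     maxi,idx=0,0
--     for i in range(1,len(l)):
--         if maxi<l[i]-l[i-1]:
--             maxi=l[i]-l[i-1]
--             idx=l[i-1]
--     mid=(maxi//2)+idx
--     dist_to_first_one=l[0]
--     dist_to_last_one=len(seats)-1-l[-1]
--     if maxi>dist_to_first_one and maxi>dist_to_last_one:
--         return mid
--     elif dist_to_first_one>maxi and dist_to_first_one>dist_to_last_one: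
--         return 0
--     else:
--         return len(seats)-1
-- ===== SOURCE B (Python) =====
-- def max_dist(seats):
--     # One pass over seats: track first occupied index, previous occupied index,
--     # and the best interior gap (strictly larger wins -> leftmost max kept).
--     first = None
--     prev = 0
--     maxi = 0
--     idx = 0
--     for i, x in enumerate(seats):
--         if x == 1:
--             if first is None:
--                 first = i
--             elif i - prev > maxi:
--                 maxi = i - prev
--                 idx = prev
--             prev = i
--     mid = (maxi // 2) + idx
--     last_dist = len(seats) - 1 - prev
--     if maxi > first and maxi > last_dist:
--         return mid
--     elif first > maxi and first > last_dist:
--         return 0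
--     else:
--         return len(seats) - 1
-- ===== Notes on version B (the rewrite author's own statement) =====
-- stated objective: simpler
-- what changed: B replaces A's two-phase approach (build the full list of occupied indices, then a second index-arithmetic loop over range(1,len(l)) with l[i]/l[i-1] lookups) by a single pass over seats that tracks first/prev occupied positions and the best gap directly, never materialising the index list.
import Mathlib
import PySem

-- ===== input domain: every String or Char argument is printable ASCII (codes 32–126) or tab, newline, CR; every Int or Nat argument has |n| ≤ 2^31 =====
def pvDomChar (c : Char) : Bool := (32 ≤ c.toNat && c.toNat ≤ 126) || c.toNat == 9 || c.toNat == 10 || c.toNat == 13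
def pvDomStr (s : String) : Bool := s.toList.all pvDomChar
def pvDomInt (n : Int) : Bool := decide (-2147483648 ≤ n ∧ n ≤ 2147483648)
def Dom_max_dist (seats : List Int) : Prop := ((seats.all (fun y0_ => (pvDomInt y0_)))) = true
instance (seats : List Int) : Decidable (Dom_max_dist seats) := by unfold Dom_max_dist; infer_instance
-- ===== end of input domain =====

-- B does the same task in one pass over seats with O(1) extra state instead of
-- building the occupied-index list and re-scanning it by index (objective: simpler).

-- ===== PORT A =====
def max_dist (seats : List Int) : Int :=
  let l : List Int := ((PySem.List.enumerate seats 0).filter (fun p => p.2 == 1)).map (·.1)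
  let st : Int × Int := (PySem.List.pyRange 1 (l.length : Int) 1).foldl
    (fun (s : Int × Int) i =>
      if s.1 < PySem.List.pyGetD l i 0 - PySem.List.pyGetD l (i - 1) 0 then
        (PySem.List.pyGetD l i 0 - PySem.List.pyGetD l (i - 1) 0, PySem.List.pyGetD l (i - 1) 0)
      else s) (0, 0)
  let maxi := st.1
  let idx := st.2
  let mid := PySem.Int.floordiv maxi 2 + idx
  let dist_to_first_one := PySem.List.pyGetD l 0 0          -- l[0]; IndexError (l = []) excluded by Pre_
  let dist_to_last_one := (seats.length : Int) - 1 - PySem.List.pyGetD l (-1) 0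
  if maxi > dist_to_first_one ∧ maxi > dist_to_last_one then mid
  else if dist_to_first_one > maxi ∧ dist_to_first_one > dist_to_last_one then 0
  else (seats.length : Int) - 1

-- ===== PORT B =====
-- state: (first : Option Int, prev, maxi, idx)
def max_dist_alt (seats : List Int) : Int :=
  let st : Option Int × Int × Int × Int := (PySem.List.enumerate seats 0).foldl
    (fun (s : Option Int × Int × Int × Int) (p : Int × Int) =>
      if p.2 == 1 then
        match s.1 with
        | none => (some p.1, p.1, s.2.2.1, s.2.2.2)
        | some f =>
          if p.1 - s.2.1 > s.2.2.1 then (some f, p.1, p.1 - s.2.1, s.2.1)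
          else (some f, p.1, s.2.2.1, s.2.2.2)
      else s) (none, 0, 0, 0)
  match st.1 with
  | none => 0          -- Python B raises TypeError here (no 1 in seats); excluded by Pre_
  | some first =>
    let prev := st.2.1
    let maxi := st.2.2.1
    let idx := st.2.2.2
    let mid := PySem.Int.floordiv maxi 2 + idx
    let last_dist := (seats.length : Int) - 1 - prev
    if maxi > first ∧ maxi > last_dist then mid
    else if first > maxi ∧ first > last_dist then 0
    else (seats.length : Int) - 1

-- ===== PRECONDITION & SPEC =====
-- Pre_ excludes inputs with no occupied seat: there A raises IndexError (l[0]) and B raises TypeError.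
def Pre_max_dist (seats : List Int) : Prop := (1 : Int) ∈ seats
instance (seats : List Int) : Decidable (Pre_max_dist seats) := by unfold Pre_max_dist; infer_instance
def pvWitness_max_dist : List Int := [1, 0, 0, 1]

def Spec_max_dist (seats : List Int) (out : Int) : Prop := out = max_dist_alt seats
instance (seats : List Int) (out : Int) : Decidable (Spec_max_dist seats out) := by unfold Spec_max_dist; infer_instance

-- ===== CLAIM (what is proved, stated in full; the proofs are below) =====
def Claim_equal_max_dist : Prop := ∀ (seats : List Int), Dom_max_dist seats → Pre_max_dist seats → Spec_max_dist seats (max_dist seats)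

-- ===== LEMMAS AND PROOFS =====

-- the common adjacent-gap loop: state (prev, maxi, idx); prev always advances
def pairLoop : Int → Int → Int → List Int → Int × Int × Int
  | prev, maxi, idx, [] => (prev, maxi, idx)
  | prev, maxi, idx, j :: rest =>
    if j - prev > maxi then pairLoop j (j - prev) prev rest
    else pairLoop j maxi idx rest

theorem pairLoop_fst (rest : List Int) : ∀ (prev maxi idx : Int),
    (pairLoop prev maxi idx rest).1 = (prev :: rest).getLast (List.cons_ne_nil _ _) := by
  induction rest with
  | nil => intro prev maxi idx; simp [pairLoop]
  | cons j rest ih =>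
    intro prev maxi idx
    simp only [pairLoop]
    split <;> rw [ih] <;> simp [List.getLast_cons]

-- A's index loop over pyRange (j+1)..len equals pairLoop on the dropped suffix.
theorem aloop (L : List Int) : ∀ (d j : Nat) (m i : Int) (_ : L.length - (j+1) = d) (hj : j < L.length),
    (PySem.List.pyRange ((j : Int) + 1) (L.length : Int) 1).foldl
      (fun (s : Int × Int) k =>
        if s.1 < PySem.List.pyGetD L k 0 - PySem.List.pyGetD L (k - 1) 0 then
          (PySem.List.pyGetD L k 0 - PySem.List.pyGetD L (k - 1) 0, PySem.List.pyGetD L (k - 1) 0)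
        else s) (m, i)
    = (pairLoop (L[j]'hj) m i (L.drop (j+1))).2 := by
  intro d
  induction d with
  | zero =>
    intro j m i hd hj
    rw [PySem.List.pyRange_one_eq_nil (a := (j:Int)+1) (b := ((L.length:Nat):Int)) (by omega),
      List.drop_of_length_le (show L.length ≤ j+1 by omega)]
    simp [pairLoop]
  | succ d ih =>
    intro j m i hd hj
    have hj1 : j + 1 < L.length := by omega
    rw [PySem.List.pyRange_one_cons (a := (j:Int)+1) (b := ((L.length:Nat):Int)) (by omega)]
    have hget : PySem.List.pyGetD L ((j : Int) + 1) 0 = L[j+1]'hj1 := by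
      rw [PySem.List.pyGetD_eq_getElem L (i := (j:Int)+1) 0 (by omega) (by omega)]
      congr 1
    have hget' : PySem.List.pyGetD L ((j : Int) + 1 - 1) 0 = L[j]'(by omega) := by
      rw [PySem.List.pyGetD_eq_getElem L (i := (j:Int)+1-1) 0 (by omega) (by omega)]
      congr 1; omega
    have hdrop : L.drop (j+1) = L[j+1]'hj1 :: L.drop (j+2) := by
      rw [List.drop_eq_getElem_cons hj1]
    rw [List.foldl_cons, hdrop]
    simp only [hget, hget', pairLoop]
    have harith : ((j : Int) + 1) + 1 = ((j+1 : Nat) : Int) + 1 := by push_cast; ring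
    by_cases hcmp : m < L[j+1]'hj1 - L[j]'(by omega)
    · rw [if_pos hcmp, if_pos (by omega), harith, ih (j+1) _ _ (by omega) hj1]
    · rw [if_neg hcmp, if_neg (by omega), harith, ih (j+1) _ _ (by omega) hj1]

-- B's fold over a plain list of indices equals pairLoop, carrying first unchanged.
theorem bloop (rest : List Int) : ∀ (f prev m i : Int),
    rest.foldl
      (fun (s : Option Int × Int × Int × Int) (j : Int) =>
        match s.1 with
        | none => (some j, j, s.2.2.1, s.2.2.2)
        | some f =>
          if j - s.2.1 > s.2.2.1 then (some f, j, j - s.2.1, s.2.1)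
          else (some f, j, s.2.2.1, s.2.2.2)) (some f, prev, m, i)
    = (some f, pairLoop prev m i rest) := by
  induction rest with
  | nil => intro f prev m i; simp [pairLoop]
  | cons j rest ih =>
    intro f prev m i
    simp only [List.foldl_cons, pairLoop]
    split
    · exact ih f j (j - prev) prev
    · exact ih f j m i

theorem max_dist_spec : Claim_equal_max_dist := by
  intro seats _ hpre
  unfold Spec_max_dist max_dist max_dist_alt
  set en := PySem.List.enumerate seats 0 with hen
  set l : List Int := (en.filter (fun p => p.2 == 1)).map (·.1) with hl
  -- B's fold over enumerate = fold over l
  have hb : en.foldl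
      (fun (s : Option Int × Int × Int × Int) (p : Int × Int) =>
        if p.2 == 1 then
          match s.1 with
          | none => (some p.1, p.1, s.2.2.1, s.2.2.2)
          | some f =>
            if p.1 - s.2.1 > s.2.2.1 then (some f, p.1, p.1 - s.2.1, s.2.1)
            else (some f, p.1, s.2.2.1, s.2.2.2)
        else s) (none, 0, 0, 0)
      = l.foldl
      (fun (s : Option Int × Int × Int × Int) (j : Int) =>
        match s.1 with
        | none => (some j, j, s.2.2.1, s.2.2.2)
        | some f =>
          if j - s.2.1 > s.2.2.1 then (some f, j, j - s.2.1, s.2.1)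
          else (some f, j, s.2.2.1, s.2.2.2)) (none, 0, 0, 0) := by
    rw [PySem.List.foldl_if_eq_foldl_filter (fun p => p.2 == 1)
      (fun (s : Option Int × Int × Int × Int) (p : Int × Int) =>
        match s.1 with
        | none => (some p.1, p.1, s.2.2.1, s.2.2.2)
        | some f =>
          if p.1 - s.2.1 > s.2.2.1 then (some f, p.1, p.1 - s.2.1, s.2.1)
          else (some f, p.1, s.2.2.1, s.2.2.2)) en (none, 0, 0, 0)]
    rw [hl, List.foldl_map]
  have hlne : l ≠ [] := by
    have h1 : (1 : Int) ∈ en.map (·.2) := by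
      rw [hen, PySem.List.map_snd_enumerate]; exact hpre
    rcases List.mem_map.mp h1 with ⟨p, hp, hp2⟩
    intro hnil
    have hpm : p ∈ en.filter (fun p => p.2 == 1) :=
      List.mem_filter.mpr ⟨hp, by simp [hp2]⟩
    rw [hl] at hnil
    simp only [List.map_eq_nil_iff] at hnil
    rw [hnil] at hpm
    exact absurd hpm (List.not_mem_nil)
  obtain ⟨a, rest, hcons⟩ := List.exists_cons_of_ne_nil hlne
  rw [hb, hcons]
  rw [List.foldl_cons]
  simp only []
  rw [bloop]
  have ha := aloop (a :: rest) (rest.length) 0 0 0 (by simp) (by simp)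
  simp only [List.getElem_cons_zero, List.drop_succ_cons, List.drop_zero, Nat.cast_zero,
    zero_add] at ha
  rw [ha]
  rw [PySem.List.pyGetD_zero_cons, PySem.List.pyGetD_neg_one (a :: rest) 0 (List.cons_ne_nil a rest),
    ← pairLoop_fst rest a 0 0]
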